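-- pv_equiv track=rewrite | github.com/moriarty-chiu/performance-testing-framework-for-apache-kafka | local-kafka-test/mock_data_generator.py | _parse_prop
-- ===== SOURCE A (Python) =====
-- from typing import Dict, List, Any
--
-- def _parse_prop(props: str, key: str, default: Any) -> Any:
--     """Parse a property from client props string."""
--     for prop in props.split():
--         if prop.startswith(f'{key}='):
--             try:
--                 return int(prop.split('=')[1])
--             except (ValueError, IndexError):
--                 return default
--     return default
-- ===== SOURCE B (Python) =====
-- def _parse_prop(props: str, key: str, default):
--     """Parse a property from client props string."""
--     table = {}
--     for tok in reversed(props.split()):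
--         parts = tok.split('=')
--         if len(parts) > 1:
--             table[parts[0]] = parts[1]
--     if key in table:
--         try:
--             return int(table[key])
--         except ValueError:
--             return default
--     return default
-- ===== Notes on version B (the rewrite author's own statement) =====
-- stated objective: alternative
-- what changed: Replaces the early-returning prefix scan by building an index once (iterating the tokens in reverse with overwrite so the first occurrence wins, keyed by the text before the first '=') and then doing a single lookup of key.
-- outside the precondition, e.g. on _parse_prop('x=5=9', 'x=5', 0): A returns 5, B returns 0; on _parse_prop('a=b=z', 'a=b', 3): A returns 3, B returns 3
import Mathlib
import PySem

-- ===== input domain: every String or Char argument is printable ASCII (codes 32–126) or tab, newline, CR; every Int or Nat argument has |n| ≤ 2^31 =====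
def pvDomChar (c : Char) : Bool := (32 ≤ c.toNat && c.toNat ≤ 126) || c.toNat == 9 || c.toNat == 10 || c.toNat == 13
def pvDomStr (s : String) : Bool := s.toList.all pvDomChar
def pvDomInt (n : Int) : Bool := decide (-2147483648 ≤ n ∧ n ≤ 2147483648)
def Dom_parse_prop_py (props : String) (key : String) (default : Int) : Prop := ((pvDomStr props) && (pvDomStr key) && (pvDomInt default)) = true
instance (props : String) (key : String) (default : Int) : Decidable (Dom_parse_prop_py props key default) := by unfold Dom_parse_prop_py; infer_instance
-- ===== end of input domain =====

-- B replaces A's early-returning prefix scan by building a key→value index once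
-- (reverse iteration with overwrite, so the first occurrence wins) followed by one lookup.

-- ===== PORT A =====
def parsePropScan (key : String) (default : Int) : List String → Int
  | [] => default
  | prop :: rest =>
    if PySem.Str.startswith prop (key ++ "=") then
      match PySem.Str.split? prop "=" with
      | some parts =>
        match PySem.List.pyGet? parts 1 with
        | some v =>
          match PySem.Int.ofStr? v with
          | some n => n          -- return int(prop.split('=')[1])
          | none => default      -- ValueError
        | none => default        -- IndexError
      | none => default          -- unreachable: separator "=" is nonempty
    else parsePropScan key default rest

def parse_prop_py (props : String) (key : String) (default : Int) : Int :=
  parsePropScan key default (PySem.Str.split₀ props)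

-- ===== PORT B =====
def parsePropStep (d : PySem.Dict String String) (tok : String) : PySem.Dict String String :=
  match PySem.Str.split? tok "=" with
  | some (p0 :: p1 :: _) => d.insert p0 p1   -- len(parts) > 1: table[parts[0]] = parts[1]
  | _ => d

def parse_prop_py_alt (props : String) (key : String) (default : Int) : Int :=
  let table := (PySem.Str.split₀ props).reverse.foldl parsePropStep PySem.Dict.empty
  match table.get? key with
  | some v =>
    match PySem.Int.ofStr? v with
    | some n => n
    | none => default
  | none => default

-- ===== PRECONDITION & SPEC =====
-- Pre_ excludes the corner where key itself contains '=' AND some whitespace-token of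
-- props starts with key+'=': there A parses a fragment of the key itself (a corner the
-- '='-separated props format cannot meaningfully specify) while B treats such a key as absent.
def Pre_parse_prop_py (props : String) (key : String) (default : Int) : Prop :=
  '=' ∈ key.toList → ∀ t ∈ PySem.Str.split₀ props, PySem.Str.startswith t (key ++ "=") = false
instance (props : String) (key : String) (default : Int) : Decidable (Pre_parse_prop_py props key default) := by unfold Pre_parse_prop_py; infer_instance

def pvWitness_parse_prop_py : String × String × Int := ("retries=5 acks=all", "retries", 7)

def Spec_parse_prop_py (props : String) (key : String) (default : Int) (out : Int) : Prop := out = parse_prop_py_alt props key default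
instance (props : String) (key : String) (default : Int) (out : Int) : Decidable (Spec_parse_prop_py props key default out) := by unfold Spec_parse_prop_py; infer_instance

-- ===== CLAIM (what is proved, stated in full; the proofs are below) =====
def Claim_equal_parse_prop_py : Prop := ∀ (props : String) (key : String) (default : Int), Dom_parse_prop_py props key default → Pre_parse_prop_py props key default → Spec_parse_prop_py props key default (parse_prop_py props key default)

-- ===== LEMMAS AND PROOFS =====

-- splitAux c l cur: structural model of PySem.Chars.splitOn.go for a single-char separator
def splitAux (c : Char) : List Char → List Char → List (List Char)
  | [], cur => [cur.reverse]
  | a :: rest, cur => if a = c then cur.reverse :: splitAux c rest [] else splitAux c rest (a :: cur)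

theorem splitOn_go_eq (c : Char) : ∀ (fuel : Nat) (l cur : List Char) (acc : List (List Char)),
    l.length < fuel →
    PySem.Chars.splitOn.go [c] fuel l cur acc = acc.reverse ++ splitAux c l cur := by
  intro fuel
  induction fuel with
  | zero => intro l cur acc h; omega
  | succ f ih =>
    intro l cur acc h
    cases l with
    | nil => simp [PySem.Chars.splitOn.go, splitAux]
    | cons a rest =>
      rw [PySem.Chars.splitOn.go]
      by_cases hac : a = c
      · subst hac
        have hp : List.isPrefixOf [a] (a :: rest) = true := by simp [List.isPrefixOf]
        simp only [hp, if_true, splitAux, List.length_cons, List.drop_succ_cons,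
          List.length_nil, List.drop_zero]
        rw [ih rest [] (cur.reverse :: acc) (by simpa using Nat.lt_of_succ_lt_succ h)]
        simp
      · have hp : List.isPrefixOf [c] (a :: rest) = false := by
          simp [List.isPrefixOf]; exact fun hca => absurd hca.symm hac
        simp only [hp, Bool.false_eq_true, if_false, splitAux, if_neg hac]
        exact ih rest (a :: cur) acc (by simpa using Nat.lt_of_succ_lt_succ h)

theorem splitOn_eq_splitAux (c : Char) (l : List Char) :
    PySem.Chars.splitOn l [c] = splitAux c l [] := by
  unfold PySem.Chars.splitOn
  rw [splitOn_go_eq c (l.length + 1) l [] [] (by omega)]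
  simp

theorem splitAux_ne_nil (c : Char) (l : List Char) : ∀ cur, splitAux c l cur ≠ [] := by
  induction l with
  | nil => intro cur; simp [splitAux]
  | cons a rest ih =>
    intro cur
    simp only [splitAux]
    split_ifs
    · simp
    · exact ih _

-- splitting a ++ c :: b where c ∉ a: the first piece is cur.reverse ++ a
theorem splitAux_append (c : Char) (a : List Char) : ∀ (b cur : List Char), c ∉ a →
    splitAux c (a ++ c :: b) cur = (cur.reverse ++ a) :: splitAux c b [] := by
  induction a with
  | nil => intro b cur _; simp [splitAux]
  | cons a0 as ih =>
    intro b cur h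
    have h0 : a0 ≠ c := fun hh => h (by simp [hh])
    have h1 : c ∉ as := fun hh => h (by simp [hh])
    simp only [List.cons_append, splitAux, if_neg h0]
    rw [ih b (a0 :: cur) h1]
    simp

-- the converse decomposition: two or more pieces force a first separator
theorem splitAux_two_pieces (c : Char) : ∀ (l cur p0 p1 : List Char) (rest : List (List Char)),
    splitAux c l cur = p0 :: p1 :: rest →
    ∃ a b, l = a ++ c :: b ∧ c ∉ a ∧ p0 = cur.reverse ++ a := by
  intro l
  induction l with
  | nil => intro cur p0 p1 rest h; simp [splitAux] at h
  | cons x xs ih =>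
    intro cur p0 p1 rest h
    simp only [splitAux] at h
    by_cases hxc : x = c
    · rw [if_pos hxc] at h
      obtain ⟨h1, _⟩ := List.cons.inj h
      exact ⟨[], xs, by simp [hxc], by simp, by simp [h1.symm]⟩
    · rw [if_neg hxc] at h
      obtain ⟨a', b', hl, hna, hp0⟩ := ih (x :: cur) p0 p1 rest h
      refine ⟨x :: a', b', by simp [hl], ?_, by simp [hp0]⟩
      intro hm
      rcases List.mem_cons.mp hm with h' | h'
      · exact hxc h'.symm
      · exact hna h'

-- per-token value function of B's index construction
def pvTokVal (key : String) (tok : String) : Option String :=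
  match PySem.Str.split? tok "=" with
  | some (p0 :: p1 :: _) => if p0 = key then some p1 else none
  | _ => none

theorem step_get? (key a : String) (d : PySem.Dict String String) :
    (parsePropStep d a).get? key =
      match pvTokVal key a with | some v => some v | none => d.get? key := by
  unfold parsePropStep pvTokVal
  cases hs : PySem.Str.split? a "=" with
  | none => rfl
  | some parts =>
    match parts with
    | [] => rfl
    | [p0] => rfl
    | p0 :: p1 :: r =>
      by_cases hk : p0 = key
      · subst hk; simp [PySem.Dict.get?_insert]
      · simp [PySem.Dict.get?_insert, hk, Ne.symm hk]

theorem get?_build (key : String) : ∀ (l : List String) (d : PySem.Dict String String),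
    (l.reverse.foldl parsePropStep d).get? key =
      match l.findSome? (pvTokVal key) with
      | some v => some v
      | none => d.get? key := by
  intro l
  induction l with
  | nil => intro d; simp
  | cons a l ih =>
    intro d
    rw [List.reverse_cons, List.foldl_append, List.findSome?_cons]
    simp only [List.foldl_cons, List.foldl_nil]
    rw [step_get?]
    cases hv : pvTokVal key a with
    | none => exact ih d
    | some v => rfl

-- the list of pieces of tok.split('='), at the character level
theorem split?_toList (t : String) :
    (PySem.Str.split? t "=").map (List.map String.toList) = some (splitAux '=' t.toList []) := by
  rw [PySem.Str.split?_map]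
  show PySem.Chars.split? t.toList "=".toList = _
  have : ("=" : String).toList = ['='] := by decide
  rw [this]
  simp [PySem.Chars.split?, splitOn_eq_splitAux]

-- a token matched by A's startswith test: B's index sees the same key and value
theorem tok_match (key : String) (hk : '=' ∉ key.toList) (t : String)
    (h : PySem.Str.startswith t (key ++ "=") = true) :
    ∃ p1 rest, PySem.Str.split? t "=" = some (key :: p1 :: rest) ∧ pvTokVal key t = some p1 := by
  rw [PySem.Str.startswith_eq, PySem.Chars.startswith_iff] at h
  have hkeq : (key ++ "=").toList = key.toList ++ ['='] := by simp
  rw [hkeq] at h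
  obtain ⟨u, hu⟩ := h
  have ht : t.toList = key.toList ++ '=' :: u := by rw [← hu]; simp
  have hsa : splitAux '=' t.toList [] = key.toList :: splitAux '=' u [] := by
    rw [ht, splitAux_append '=' key.toList u [] hk]; simp
  obtain ⟨q0, qs, hq⟩ := List.exists_cons_of_ne_nil (splitAux_ne_nil '=' u [])
  have hmap := split?_toList t
  rw [hsa, hq] at hmap
  cases hsp : PySem.Str.split? t "=" with
  | none => rw [hsp] at hmap; simp at hmap
  | some parts =>
    rw [hsp] at hmap
    simp only [Option.map_some, Option.some.injEq] at hmap
    match parts, hmap with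
    | [], hmap => simp at hmap
    | [pa], hmap => simp at hmap
    | pa :: pb :: pr, hmap =>
      simp only [List.map_cons, List.cons.injEq] at hmap
      obtain ⟨ha, hb, _⟩ := hmap
      have hpa : pa = key := by
        have := congrArg String.ofList ha
        simpa [String.ofList_toList] using this
      refine ⟨pb, pr, by rw [hpa], ?_⟩
      unfold pvTokVal
      rw [hsp, hpa]
      simp

-- a token not matched by A's test contributes nothing under this key
theorem tok_nomatch (key : String) (hk : '=' ∉ key.toList) (t : String)
    (h : PySem.Str.startswith t (key ++ "=") = false) :
    pvTokVal key t = none := by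
  unfold pvTokVal
  cases hsp : PySem.Str.split? t "=" with
  | none => rfl
  | some parts =>
    match parts with
    | [] => rfl
    | [p0] => rfl
    | p0 :: p1 :: r =>
      by_cases hke : p0 = key
      · exfalso
        subst hke
        have hmap := split?_toList t
        rw [hsp] at hmap
        simp only [Option.map_some, Option.some.injEq, List.map_cons] at hmap
        obtain ⟨a, b, hl, hna, hp0⟩ := splitAux_two_pieces '=' t.toList [] p0.toList p1.toList _ hmap.symm
        simp only [List.reverse_nil, List.nil_append] at hp0
        rw [PySem.Str.startswith_eq] at h
        have hsw : PySem.Chars.startswith t.toList (p0 ++ "=").toList = true := by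
          rw [PySem.Chars.startswith_iff]
          refine ⟨b, ?_⟩
          simp [hl, ← hp0]
        rw [hsw] at h
        exact absurd h (by simp)
      · simp [hke]

theorem scan_eq_lookup (key : String) (default : Int) (hk : '=' ∉ key.toList) :
    ∀ (l : List String),
    parsePropScan key default l =
      match l.findSome? (pvTokVal key) with
      | some v => (match PySem.Int.ofStr? v with | some n => n | none => default)
      | none => default := by
  intro l
  induction l with
  | nil => simp [parsePropScan]
  | cons t l ih =>
    rw [List.findSome?_cons]
    unfold parsePropScan
    cases hb : PySem.Str.startswith t (key ++ "=") with
    | false => rw [tok_nomatch key hk t hb]; simpa using ih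
    | true =>
      obtain ⟨p1, rest, hsplit, htok⟩ := tok_match key hk t hb
      rw [htok, hsplit]
      simp [PySem.List.pyGet?, PySem.List.pyIdx?]

-- when the key itself contains '=', B's index can never hold it
theorem tokval_none_of_eq_mem (key : String) (hk : '=' ∈ key.toList) (t : String) :
    pvTokVal key t = none := by
  unfold pvTokVal
  cases hsp : PySem.Str.split? t "=" with
  | none => rfl
  | some parts =>
    match parts with
    | [] => rfl
    | [p0] => rfl
    | p0 :: p1 :: r =>
      by_cases hke : p0 = key
      · exfalso
        subst hke
        have hmap := split?_toList t
        rw [hsp] at hmap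
        simp only [Option.map_some, Option.some.injEq, List.map_cons] at hmap
        obtain ⟨a, b, hl, hna, hp0⟩ := splitAux_two_pieces '=' t.toList [] p0.toList p1.toList _ hmap.symm
        simp only [List.reverse_nil, List.nil_append] at hp0
        rw [← hp0] at hna
        exact hna hk
      · simp [hke]

theorem findSome?_tokval_none (key : String) (hk : '=' ∈ key.toList) :
    ∀ (l : List String), l.findSome? (pvTokVal key) = none := by
  intro l
  induction l with
  | nil => rfl
  | cons t l ih => rw [List.findSome?_cons, tokval_none_of_eq_mem key hk t]; exact ih

theorem scan_default (key : String) (default : Int) :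
    ∀ (l : List String), (∀ t ∈ l, PySem.Str.startswith t (key ++ "=") = false) →
    parsePropScan key default l = default := by
  intro l
  induction l with
  | nil => intro _; rfl
  | cons t l ih =>
    intro h
    unfold parsePropScan
    rw [h t (List.mem_cons_self ..)]
    simpa using ih fun x hx => h x (List.mem_cons_of_mem _ hx)

-- ===== VERDICT (by name: the statement is the Claim_ definition above) =====
theorem parse_prop_py_spec : Claim_equal_parse_prop_py := by
  intro props key default _ hpre
  unfold Spec_parse_prop_py parse_prop_py parse_prop_py_alt
  by_cases hk : '=' ∈ key.toList
  · rw [scan_default key default (PySem.Str.split₀ props) (hpre hk)]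
    simp only [get?_build key (PySem.Str.split₀ props) PySem.Dict.empty,
      findSome?_tokval_none key hk, PySem.Dict.get?_empty]
  · rw [scan_eq_lookup key default hk]
    simp only [get?_build key (PySem.Str.split₀ props) PySem.Dict.empty, PySem.Dict.get?_empty]
    cases (PySem.Str.split₀ props).findSome? (pvTokVal key) <;> rfl
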